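-- pv_equiv track=rewrite | github.com/Horsmann/book_the_data_scientists_impact | chapter4/iteration3/password_validator.py | check_sequential_letters
-- ===== SOURCE A (Python) =====
-- def check_sequential_letters(input_string: str) -> bool:
--     for i in range(len(input_string) - 2):
--         # Convert the current character and the next two to their ASCII values
--         first_char = ord(input_string[i])
--         second_char = ord(input_string[i + 1])
--         third_char = ord(input_string[i + 2])
--
--         # Check if they form a consecutive sequence
--         if second_char == first_char + 1 and third_char == second_char + 1:
--             return True
--
--     return False
-- ===== SOURCE B (Python) =====
-- def check_sequential_letters(input_string: str) -> bool:
--     # Single scan maintaining the length of the current run of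
--     # strictly consecutive (code +1) characters.
--     run = 1
--     for i in range(1, len(input_string)):
--         if ord(input_string[i]) == ord(input_string[i - 1]) + 1:
--             run += 1
--             if run >= 3:
--                 return True
--         else:
--             run = 1
--     return False
-- ===== Notes on version B (the rewrite author's own statement) =====
-- stated objective: alternative
-- what changed: Instead of testing three fixed offsets at every index, B makes a single scan that maintains the length of the current consecutive-code run and answers as soon as the run reaches 3.
import Mathlib
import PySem

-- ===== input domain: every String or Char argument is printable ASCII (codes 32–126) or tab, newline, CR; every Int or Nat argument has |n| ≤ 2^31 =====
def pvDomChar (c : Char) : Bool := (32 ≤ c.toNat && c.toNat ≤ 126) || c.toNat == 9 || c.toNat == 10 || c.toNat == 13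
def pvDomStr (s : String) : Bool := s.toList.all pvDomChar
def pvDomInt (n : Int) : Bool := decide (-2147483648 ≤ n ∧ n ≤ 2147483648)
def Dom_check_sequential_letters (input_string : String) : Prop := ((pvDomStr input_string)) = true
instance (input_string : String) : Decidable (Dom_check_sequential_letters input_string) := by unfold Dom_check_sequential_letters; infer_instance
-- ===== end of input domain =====

-- B replaces A's three-fixed-offset test per index by a single scan keeping a running
-- count of the current consecutive-code streak (same O(n) cost, different decomposition).

-- ===== PORT A =====
-- body of A's loop at index i: ord of s[i], s[i+1], s[i+2] and the consecutive test
def csl_tripleAt (chars : List Char) (i : Int) : Bool :=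
  match PySem.List.pyGet? chars i, PySem.List.pyGet? chars (i + 1),
        PySem.List.pyGet? chars (i + 2) with
  | some first_char, some second_char, some third_char =>
      second_char.toNat == first_char.toNat + 1 && third_char.toNat == second_char.toNat + 1
  | _, _, _ => false

-- 'for i in range(len(s) - 2): if …: return True' / 'return False'
def check_sequential_letters (input_string : String) : Bool :=
  (PySem.List.pyRange 0 ((input_string.toList.length : Int) - 2)).any
    (csl_tripleAt input_string.toList)

-- ===== PORT B =====
-- B's loop: prev = s[i-1], run = current streak length; early True when run reaches 3
def csl_scan (prev : Char) (run : Nat) : List Char → Bool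
  | [] => false
  | c :: rest =>
      if c.toNat == prev.toNat + 1 then
        if run + 1 ≥ 3 then true else csl_scan c (run + 1) rest
      else csl_scan c 1 rest

def check_sequential_letters_alt (input_string : String) : Bool :=
  match input_string.toList with
  | [] => false
  | c :: rest => csl_scan c 1 rest

-- ===== PRECONDITION & SPEC =====
def Spec_check_sequential_letters (input_string : String) (out : Bool) : Prop := out = check_sequential_letters_alt input_string
instance (input_string : String) (out : Bool) : Decidable (Spec_check_sequential_letters input_string out) := by unfold Spec_check_sequential_letters; infer_instance

-- ===== CLAIM (what is proved, stated in full; the proofs are below) =====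
def Claim_equal_check_sequential_letters : Prop := ∀ (input_string : String), Dom_check_sequential_letters input_string → Spec_check_sequential_letters input_string (check_sequential_letters input_string)

-- ===== LEMMAS AND PROOFS =====

-- reference characterisation: "some window of three consecutive codes exists", recursively
def csl_spec : List Char → Bool
  | a :: b :: c :: t =>
      (b.toNat == a.toNat + 1 && c.toNat == b.toNat + 1) || csl_spec (b :: c :: t)
  | _ => false

lemma csl_tripleAt_cons (a : Char) (l : List Char) (k : Nat) :
    csl_tripleAt (a :: l) ((k + 1 : Nat) : Int) = csl_tripleAt l (k : Int) := by
  have h1 : ((k + 1 : Nat) : Int) + 1 = ((k + 2 : Nat) : Int) := by push_cast; ring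
  have h2 : ((k + 1 : Nat) : Int) + 2 = ((k + 3 : Nat) : Int) := by push_cast; ring
  have h3 : ((k : Nat) : Int) + 1 = ((k + 1 : Nat) : Int) := by push_cast; ring
  have h4 : ((k : Nat) : Int) + 2 = ((k + 2 : Nat) : Int) := by push_cast; ring
  simp only [csl_tripleAt, h1, h2, h3, h4, PySem.List.pyGet?_natCast,
    List.getElem?_cons_succ]

lemma csl_tripleAt_zero (a b c : Char) (t : List Char) :
    csl_tripleAt (a :: b :: c :: t) 0
      = (b.toNat == a.toNat + 1 && c.toNat == b.toNat + 1) := by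
  have e0 : PySem.List.pyGet? (a :: b :: c :: t) 0 = some a := by
    rw [show (0 : Int) = ((0 : Nat) : Int) from rfl, PySem.List.pyGet?_natCast]; rfl
  have e1 : PySem.List.pyGet? (a :: b :: c :: t) 1 = some b := by
    rw [show (1 : Int) = ((1 : Nat) : Int) from rfl, PySem.List.pyGet?_natCast]; rfl
  have e2 : PySem.List.pyGet? (a :: b :: c :: t) 2 = some c := by
    rw [show (2 : Int) = ((2 : Nat) : Int) from rfl, PySem.List.pyGet?_natCast]; rfl
  simp only [csl_tripleAt]
  norm_num [e0, e1, e2]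

lemma csl_A_eq_spec (l : List Char) :
    (PySem.List.pyRange 0 ((l.length : Int) - 2)).any (csl_tripleAt l) = csl_spec l := by
  induction l with
  | nil => simp [PySem.List.pyRange_one_eq_nil (by norm_num : (-2 : Int) ≤ 0), csl_spec]
  | cons a rest ih =>
    match rest with
    | [] =>
      simp [PySem.List.pyRange_one_eq_nil (by norm_num : (-1 : Int) ≤ 0), csl_spec]
    | [b] =>
      simp [PySem.List.pyRange_one_eq_nil (by norm_num : (0 : Int) ≤ 0), csl_spec]
    | b :: c :: t =>
      have hlen : ((a :: b :: c :: t).length : Int) - 2 = ((t.length + 1 : Nat) : Int) := by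
        simp; omega
      have hlen' : ((b :: c :: t).length : Int) - 2 = ((t.length : Nat) : Int) := by
        simp; omega
      rw [hlen, PySem.List.pyRange_zero_natCast, List.range_succ_eq_map] at *
      rw [hlen', PySem.List.pyRange_zero_natCast] at ih
      simp only [List.map_cons, List.any_cons, List.map_map, List.any_map] at *
      have hshift : (List.range t.length).any
            ((csl_tripleAt (a :: b :: c :: t)) ∘ (fun k : Nat => (k : Int)) ∘ Nat.succ)
          = (List.range t.length).any ((csl_tripleAt (b :: c :: t)) ∘ fun k : Nat => (k : Int)) := by
        apply PySem.List.any_congr_mem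
        intro k _
        exact csl_tripleAt_cons a (b :: c :: t) k
      rw [hshift, ih]
      conv_rhs => rw [csl_spec]
      simp only [Nat.cast_zero, csl_tripleAt_zero]

lemma csl_scan_one : ∀ (n : Nat) (l : List Char), l.length ≤ n →
    ∀ p : Char, csl_scan p 1 l = csl_spec (p :: l) := by
  intro n
  induction n with
  | zero =>
    intro l h p
    have hl : l = [] := by cases l <;> simp_all
    subst hl; simp [csl_scan, csl_spec]
  | succ n ih =>
    intro l h p
    match l with
    | [] => simp [csl_scan, csl_spec]
    | c :: rest =>
      by_cases hc : (c.toNat == p.toNat + 1) = true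
      · -- streak extends: run becomes 2
        have : csl_scan p 1 (c :: rest) = csl_scan c 2 rest := by
          simp [csl_scan, hc]
        rw [this]
        match rest with
        | [] => simp [csl_scan, csl_spec]
        | d :: t =>
          by_cases hd : (d.toNat == c.toNat + 1) = true
          · simp [csl_scan, hd, csl_spec, hc]
          · have hsc : csl_scan c 2 (d :: t) = csl_scan d 1 t := by
              simp [csl_scan, hd]
            have ht : t.length ≤ n := by simp at h; omega
            rw [hsc, ih t ht d]
            match t with
            | [] => simp [csl_spec, hd]
            | e :: u => simp [csl_spec, hd, hc]
      · -- streak breaks: run resets to 1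
        have hsc : csl_scan p 1 (c :: rest) = csl_scan c 1 rest := by
          simp [csl_scan, hc]
        have hr : rest.length ≤ n := by simp at h; omega
        rw [hsc, ih rest hr c]
        match rest with
        | [] => simp [csl_spec]
        | d :: t => simp [csl_spec, hc]

-- ===== VERDICT (by name: the statement is the Claim_ definition above) =====
theorem check_sequential_letters_spec : Claim_equal_check_sequential_letters := by
  intro s _
  unfold Spec_check_sequential_letters check_sequential_letters check_sequential_letters_alt
  match hl : s.toList with
  | [] =>
    simp [PySem.List.pyRange_one_eq_nil (by norm_num : (-2 : Int) ≤ 0)]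
  | c :: rest =>
    rw [csl_A_eq_spec]
    show csl_spec (c :: rest) = csl_scan c 1 rest
    exact (csl_scan_one rest.length rest le_rfl c).symm
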